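-- pv_equiv track=rewrite | github.com/pypi-data/pypi-mirror-237 | packages/Quanthon/Quanthon-0.1.2-py3-none-any.whl/Quanthon/Expectation.py | get_swaps
-- ===== SOURCE A (Python) =====
-- def _no_pauli_after_i(pauli_str):
--
--     detected_I = False
--     for op in pauli_str:
--         if not detected_I:
--             if op == 'I':
--                 detected_I = True
--                 continue
--             else:
--                 continue
--         if op != 'I':
--             return False
--     return True
--
-- def get_swaps(pauli_str, swap_list):
--
--     if _no_pauli_after_i(pauli_str):
--         return ''.join(pauli_str), swap_list
--
--     found_I = False
--     pauli_str = list(pauli_str)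
--     for i, op in enumerate(pauli_str):
--         if op == 'I':
--             found_I = True
--             I_indx = i
--             continue
--         if found_I:
--             if op != 'I':
--                 non_i_indx = i
--             pauli_str[I_indx] = op
--             pauli_str[non_i_indx]= 'I'
--             swap_list.append((I_indx, non_i_indx))
--             found_I = False
--
--     return get_swaps(pauli_str, swap_list)
-- ===== SOURCE B (Python) =====
-- def get_swaps(pauli_str, swap_list):
--     # Iterative bubble passes: repeatedly build a new list in one left-to-right
--     # scan, swapping every adjacent ('I', non-'I') pair, until a pass makes no swap.
--     cur = list(pauli_str)
--     n = len(cur)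
--     while True:
--         out = []
--         swaps = []
--         i = 0
--         while i < n:
--             if cur[i] == 'I' and i + 1 < n and cur[i + 1] != 'I':
--                 out.append(cur[i + 1])
--                 out.append('I')
--                 swaps.append((i, i + 1))
--                 i += 2
--             else:
--                 out.append(cur[i])
--                 i += 1
--         if not swaps:
--             break
--         cur = out
--         swap_list.extend(swaps)
--     return ''.join(cur), swap_list
-- ===== Notes on version B (the rewrite author's own statement) =====
-- stated objective: alternative
-- what changed: Replaces A's tail recursion (with its separate pre-check helper and in-place found_I/I_indx index bookkeeping over a mutating list) by an explicit repeat-until-no-swap loop whose single pass is a fresh scan that consumes one or two cells at a time, swapping each adjacent ('I', non-'I') pair and collecting the pass's swaps before extending swap_list.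
import Mathlib
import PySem

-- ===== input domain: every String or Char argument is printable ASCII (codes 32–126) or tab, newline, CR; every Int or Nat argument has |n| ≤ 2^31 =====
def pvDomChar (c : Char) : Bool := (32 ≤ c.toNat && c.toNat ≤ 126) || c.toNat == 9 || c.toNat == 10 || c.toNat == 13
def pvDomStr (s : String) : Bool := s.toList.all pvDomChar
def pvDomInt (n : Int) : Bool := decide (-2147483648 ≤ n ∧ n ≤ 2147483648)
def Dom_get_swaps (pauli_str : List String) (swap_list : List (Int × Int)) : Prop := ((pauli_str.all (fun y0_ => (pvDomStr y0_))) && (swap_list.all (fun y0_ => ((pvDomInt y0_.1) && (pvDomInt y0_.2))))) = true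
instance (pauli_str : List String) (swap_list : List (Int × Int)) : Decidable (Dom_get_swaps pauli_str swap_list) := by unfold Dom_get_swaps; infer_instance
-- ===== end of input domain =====

-- B replaces A's tail recursion (plus its separate pre-check helper and found_I/I_indx
-- bookkeeping over a mutating list) by an explicit repeat-until-no-swap loop whose single
-- pass is a fresh scan consuming one or two cells at a time (objective: alternative, same cost).
-- Both Pythons extend the passed-in swap_list in place; the theorem is about the return value
-- (equal return values here imply the same final swap_list contents).

-- ===== PORT A =====
-- port of _no_pauli_after_i: the for-loop with its detected_I flag as a two-state recursion
def noIgo (detected_I : Bool) (l : List String) : Bool :=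
  match l with
  | [] => true
  | op :: rest =>
    if !detected_I then
      if op == "I" then noIgo true rest else noIgo false rest
    else
      if op != "I" then false else noIgo true rest

-- A's for-loop over the mutating list (enumerate reads the current cell each step)
def sweepA (lst : List String) (i : Nat) (found_I : Bool) (I_indx : Nat)
    (swaps : List (Int × Int)) : List String × List (Int × Int) :=
  if h : i < lst.length then
    let op := lst[i]
    if op == "I" then
      sweepA lst (i+1) true i swaps
    else if found_I then
      let non_i_indx := i   -- the guarding `if op != 'I'` always holds here (op ≠ 'I')
      let lst' := (lst.set I_indx op).set non_i_indx "I"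
      sweepA lst' (i+1) false I_indx (swaps ++ [((I_indx : Int), (non_i_indx : Int))])
    else
      sweepA lst (i+1) found_I I_indx swaps
  else (lst, swaps)
termination_by lst.length - i
decreasing_by all_goals ((try simp only [List.length_set]); omega)

-- fuel measure shared by both top-level loops: number of (I, later non-I) inversions.
-- invI l + 1 calls always suffice (each non-final iteration removes at least one inversion,
-- proved below in invI_decrease); the fuel-0 branch is a totality guard, never reached.
def invI : List String → Nat
  | [] => 0
  | x :: xs => (if x == "I" then xs.countP (fun s => !(s == "I")) else 0) + invI xs

def get_swapsGo (fuel : Nat) (pauli_str : List String) (swap_list : List (Int × Int)) :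
    String × (List (Int × Int)) :=
  match fuel with
  | 0 => (PySem.Str.join "" pauli_str, swap_list)   -- fuel guard, unreachable
  | f+1 =>
    if noIgo false pauli_str then
      (PySem.Str.join "" pauli_str, swap_list)
    else
      let r := sweepA pauli_str 0 false 0 swap_list
      get_swapsGo f r.1 r.2

def get_swaps (pauli_str : List String) (swap_list : List (Int × Int)) : String × (List (Int × Int)) :=
  get_swapsGo (invI pauli_str + 1) pauli_str swap_list

-- ===== PORT B =====
-- one pass of Source B's inner while loop: consumes one or two cells per step,
-- swapping each adjacent ('I', non-'I') pair and recording its index pair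
def sweepB (i : Nat) (l : List String) : List String × List (Int × Int) :=
  match l with
  | [] => ([], [])
  | [x] => ([x], [])
  | x :: y :: ys =>
    if x == "I" && !(y == "I") then
      let r := sweepB (i+2) ys
      (y :: "I" :: r.1, ((i : Int), (i : Int) + 1) :: r.2)
    else
      let r := sweepB (i+1) (y :: ys)
      (x :: r.1, r.2)
termination_by l.length
decreasing_by all_goals (simp only [List.length_cons]; omega)

-- Source B's outer `while True` loop, with the same fuel guard
def loopB (fuel : Nat) (cur : List String) (swap_list : List (Int × Int)) :
    String × (List (Int × Int)) :=
  match fuel with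
  | 0 => (PySem.Str.join "" cur, swap_list)   -- fuel guard, unreachable
  | f+1 =>
    let r := sweepB 0 cur
    if r.2.isEmpty then (PySem.Str.join "" cur, swap_list)
    else loopB f r.1 (swap_list ++ r.2)

def get_swaps_alt (pauli_str : List String) (swap_list : List (Int × Int)) : String × (List (Int × Int)) :=
  loopB (invI pauli_str + 1) pauli_str swap_list

-- ===== PRECONDITION & SPEC =====
def Spec_get_swaps (pauli_str : List String) (swap_list : List (Int × Int)) (out : String × (List (Int × Int))) : Prop := out = get_swaps_alt pauli_str swap_list
instance (pauli_str : List String) (swap_list : List (Int × Int)) (out : String × (List (Int × Int))) : Decidable (Spec_get_swaps pauli_str swap_list out) := by unfold Spec_get_swaps; infer_instance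

-- ===== CLAIM (what is proved, stated in full; the proofs are below) =====
def Claim_equal_get_swaps : Prop := ∀ (pauli_str : List String) (swap_list : List (Int × Int)), Dom_get_swaps pauli_str swap_list → Spec_get_swaps pauli_str swap_list (get_swaps pauli_str swap_list)

-- ===== LEMMAS AND PROOFS =====
theorem sweepB_cons_cons_pos (i : Nat) (x y : String) (ys : List String)
    (hc : (x == "I" && !(y == "I")) = true) :
    sweepB i (x :: y :: ys) =
      (y :: "I" :: (sweepB (i+2) ys).1, ((i : Int), (i : Int) + 1) :: (sweepB (i+2) ys).2) := by
  rw [sweepB, if_pos hc]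

theorem sweepB_cons_cons_neg (i : Nat) (x y : String) (ys : List String)
    (hc : ¬ (x == "I" && !(y == "I")) = true) :
    sweepB i (x :: y :: ys) = (x :: (sweepB (i+1) (y :: ys)).1, (sweepB (i+1) (y :: ys)).2) := by
  rw [sweepB, if_neg hc]

theorem sweepB_perm (i : Nat) (l : List String) : ((sweepB i l).1).Perm l := by
  induction i, l using sweepB.induct with
  | case1 i => simp [sweepB]
  | case2 i x => simp [sweepB]
  | case3 i x y ys hc ih =>
    have hx : x = "I" := by
      have := (Bool.and_eq_true _ _).mp hc
      simpa using this.1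
    rw [sweepB_cons_cons_pos i x y ys hc]
    exact ((ih.cons "I").cons y).trans (hx ▸ List.Perm.swap x y ys)
  | case4 i x y ys hc ih =>
    rw [sweepB_cons_cons_neg i x y ys hc]
    exact ih.cons x

theorem sweepB_inv (i : Nat) (l : List String) :
    invI (sweepB i l).1 + (sweepB i l).2.length = invI l := by
  induction i, l using sweepB.induct with
  | case1 i => simp [sweepB, invI]
  | case2 i x => simp [sweepB, invI]
  | case3 i x y ys hc ih =>
    have hx : x = "I" := by
      have := (Bool.and_eq_true _ _).mp hc
      simpa using this.1
    have hy : (y == "I") = false := by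
      have := (Bool.and_eq_true _ _).mp hc
      simpa using this.2
    have hcount := List.Perm.countP_eq (fun s => !(s == "I")) (sweepB_perm (i+2) ys)
    rw [sweepB_cons_cons_pos i x y ys hc]
    simp [invI, hx, hy, hcount, List.countP_cons]
    omega
  | case4 i x y ys hc ih =>
    have hcount := List.Perm.countP_eq (fun s => !(s == "I")) (sweepB_perm (i+1) (y :: ys))
    rw [sweepB_cons_cons_neg i x y ys hc]
    by_cases hx : (x == "I") = true
    · have hy : (y == "I") = true := by
        by_contra hyn
        exact hc (by simp_all)
      simp [invI, hx, hy, hcount, List.countP_cons] at *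
      omega
    · simp [invI, hx, hcount] at *
      omega

theorem noI_iff (i : Nat) (l : List String) : noIgo false l = true ↔ (sweepB i l).2 = [] := by
  induction i, l using sweepB.induct with
  | case1 i => simp [sweepB, noIgo]
  | case2 i x => by_cases hx : (x == "I") = true <;> simp [sweepB, noIgo, hx]
  | case3 i x y ys hc ih =>
    have hx : x = "I" := by
      have := (Bool.and_eq_true _ _).mp hc
      simpa using this.1
    have hy : (y == "I") = false := by
      have := (Bool.and_eq_true _ _).mp hc
      simpa using this.2
    rw [sweepB_cons_cons_pos i x y ys hc]
    simp [noIgo, hx, hy]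
    intro h
    simp [h] at hy
  | case4 i x y ys hc ih =>
    rw [sweepB_cons_cons_neg i x y ys hc]
    by_cases hx : (x == "I") = true
    · have hy : (y == "I") = true := by
        by_contra hyn
        exact hc (by simp_all)
      have hx' : x = "I" := by simpa using hx
      have hy' : y = "I" := by simpa using hy
      have he : noIgo false (x :: y :: ys) = noIgo false (y :: ys) := by
        simp [noIgo, hx', hy']
      rw [he, ih]
    · have he : noIgo false (x :: y :: ys) = noIgo false (y :: ys) := by
        simp [noIgo, hx]
      rw [he, ih]

theorem sweepB_cons_nonI (i : Nat) (x : String) (xs : List String) (hx : (x == "I") = false) :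
    sweepB i (x :: xs) = (x :: (sweepB (i+1) xs).1, (sweepB (i+1) xs).2) := by
  cases xs with
  | nil => simp [sweepB]
  | cons y ys => rw [sweepB_cons_cons_neg _ _ _ _ (by simp [hx])]

theorem sweepB_cons_II (i : Nat) (ys : List String) :
    sweepB i ("I" :: "I" :: ys) = ("I" :: (sweepB (i+1) ("I" :: ys)).1, (sweepB (i+1) ("I" :: ys)).2) := by
  rw [sweepB_cons_cons_neg _ _ _ _ (by simp)]

theorem sweepA_spec (n : Nat) : ∀ (lst : List String) (i : Nat) (swaps : List (Int × Int)),
    lst.length - i = n →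
    ((∀ k, sweepA lst i false k swaps =
      (lst.take i ++ (sweepB i (lst.drop i)).1, swaps ++ (sweepB i (lst.drop i)).2)) ∧
     (∀ j, i = j + 1 → lst[j]? = some "I" → sweepA lst i true j swaps =
      (lst.take j ++ (sweepB j ("I" :: lst.drop i)).1,
       swaps ++ (sweepB j ("I" :: lst.drop i)).2))) := by
  induction n using Nat.strong_induction_on with
  | _ n ihn =>
  intro lst i swaps hn
  constructor
  · -- found_I = false
    intro k
    by_cases h : i < lst.length
    · have hdrop : lst.drop i = lst[i] :: lst.drop (i+1) := (List.getElem_cons_drop h).symm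
      by_cases hop : (lst[i] == "I") = true
      · have hstep : sweepA lst i false k swaps = sweepA lst (i+1) true i swaps := by
          rw [sweepA]; rw [dif_pos h]; simp only [hop, if_pos]
        have hrec := ((ihn (lst.length - (i+1)) (by omega) lst (i+1) swaps rfl).2 i rfl
          (by rw [List.getElem?_eq_getElem h]; simpa using hop))
        rw [hstep, hrec, hdrop]
        have : lst[i] = "I" := by simpa using hop
        rw [this]
      · have hstep : sweepA lst i false k swaps = sweepA lst (i+1) false k swaps := by
          rw [sweepA]; rw [dif_pos h]; simp only [hop, Bool.false_eq_true, if_false]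
        have hrec := (ihn (lst.length - (i+1)) (by omega) lst (i+1) swaps rfl).1 k
        rw [hstep, hrec, hdrop, sweepB_cons_nonI _ _ _ (by simpa using hop)]
        have htake : lst.take (i+1) = lst.take i ++ [lst[i]] := by
          rw [List.take_succ, List.getElem?_eq_getElem h]; rfl
        rw [htake, List.append_assoc]
        rfl
    · rw [sweepA, dif_neg h]
      rw [List.take_of_length_le (by omega), List.drop_eq_nil_of_le (by omega)]
      simp [sweepB]
  · -- found_I = true, I_indx = j, i = j+1, lst[j] = "I"
    rintro j rfl hIm
    have hj : j < lst.length := List.getElem?_eq_some_iff.mp hIm |>.1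
    have hjI : lst[j] = "I" := by
      have := List.getElem?_eq_some_iff.mp hIm
      exact this.2
    by_cases h : j + 1 < lst.length
    · have hdrop : lst.drop (j+1) = lst[j+1] :: lst.drop (j+2) := (List.getElem_cons_drop h).symm
      by_cases hop : (lst[j+1] == "I") = true
      · have hstep : sweepA lst (j+1) true j swaps = sweepA lst (j+2) true (j+1) swaps := by
          rw [sweepA]; rw [dif_pos h]; simp only [hop, if_pos]
        have hrec := ((ihn (lst.length - (j+2)) (by omega) lst (j+2) swaps rfl).2 (j+1) rfl
          (by rw [List.getElem?_eq_getElem h]; simpa using hop))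
        rw [hstep, hrec, hdrop]
        have hop' : lst[j+1] = "I" := by simpa using hop
        rw [hop', sweepB_cons_II]
        have htake : lst.take (j+1) = lst.take j ++ ["I"] := by
          rw [List.take_succ, List.getElem?_eq_getElem hj, hjI]; rfl
        simp [htake]
      · -- swap case
        have hA : (lst.take j).length = j := by simp; omega
        have hset : (lst.set j lst[j+1]).set (j+1) "I"
            = lst.take j ++ lst[j+1] :: "I" :: lst.drop (j+2) := by
          have e1 : lst.set j lst[j+1] = lst.take j ++ lst[j+1] :: lst.drop (j+1) := by
            rw [List.set_eq_take_append_cons_drop, if_pos hj]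
          rw [e1, List.set_append, if_neg (by omega), hA]
          have h1 : j + 1 - j = 1 := by omega
          rw [h1, List.set_cons_succ, hdrop, List.set_cons_zero]
        have hstep : sweepA lst (j+1) true j swaps
            = sweepA ((lst.set j lst[j+1]).set (j+1) "I") (j+2) false j
                (swaps ++ [((j : Int), ((j+1 : Nat) : Int))]) := by
          rw [sweepA]; rw [dif_pos h]
          simp only [hop, Bool.false_eq_true, if_false, if_pos]
        have hlen' : ((lst.set j lst[j+1]).set (j+1) "I").length = lst.length := by simp
        have hrec := (ihn (lst.length - (j+2)) (by omega)
          ((lst.set j lst[j+1]).set (j+1) "I") (j+2)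
          (swaps ++ [((j : Int), ((j+1 : Nat) : Int))]) (by rw [hlen'])).1 j
        have htk : List.take (j+2) (lst.take j ++ lst[j+1] :: "I" :: lst.drop (j+2))
            = lst.take j ++ [lst[j+1], "I"] := by
          rw [List.take_append, hA, List.take_take]
          have h1 : min (j+2) j = j := by omega
          have h2 : j + 2 - j = 2 := by omega
          rw [h1, h2]
          rfl
        have hdr : List.drop (j+2) (lst.take j ++ lst[j+1] :: "I" :: lst.drop (j+2))
            = lst.drop (j+2) := by
          rw [List.drop_append, hA, List.drop_eq_nil_of_le (le_trans (List.length_take_le _ _) (by omega))]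
          have h2 : j + 2 - j = 2 := by omega
          rw [h2]; rfl
        have hcast : ((j+1 : Nat) : Int) = (j : Int) + 1 := by push_cast; ring
        rw [hstep, hrec, hset, htk, hdr, hdrop]
        rw [sweepB_cons_cons_pos _ _ _ _ (by simp [(by simpa using hop : ¬ lst[j+1] = "I")])]
        rw [hcast]
        simp [List.append_assoc]
    · have hlen : lst.length = j + 1 := by omega
      rw [sweepA, dif_neg h]
      rw [List.drop_eq_nil_of_le (by omega)]
      have htake : lst.take (j+1) = lst.take j ++ ["I"] := by
        rw [List.take_succ, List.getElem?_eq_getElem hj, hjI]; rfl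
      have : lst = lst.take j ++ ["I"] := by
        conv_lhs => rw [← List.take_of_length_le (by omega : lst.length ≤ j + 1), htake]
      rw [sweepB]
      simp [← this]

theorem sweepA_top (lst : List String) (swaps : List (Int × Int)) :
    sweepA lst 0 false 0 swaps = ((sweepB 0 lst).1, swaps ++ (sweepB 0 lst).2) := by
  have := (sweepA_spec (lst.length - 0) lst 0 swaps rfl).1 0
  simpa using this

theorem invI_decrease (i : Nat) (l : List String) (h : noIgo false l = false) :
    invI (sweepB i l).1 < invI l := by
  have h2 : (sweepB i l).2 ≠ [] := fun he => by
    rw [(noI_iff i l).mpr he] at h; exact Bool.true_eq_false.mp h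
  have h3 : 0 < (sweepB i l).2.length := List.length_pos_iff.mpr h2
  have := sweepB_inv i l
  omega

theorem main_eq : ∀ (f : Nat) (l : List String) (s : List (Int × Int)), invI l < f →
    get_swapsGo f l s = loopB f l s := by
  intro f
  induction f with
  | zero => intro l s h; omega
  | succ f ih =>
    intro l s hf
    by_cases hno : noIgo false l = true
    · have he : (sweepB 0 l).2 = [] := (noI_iff 0 l).mp hno
      simp [get_swapsGo, loopB, hno, he]
    · have hno' : noIgo false l = false := by simpa using hno
      have h2 : (sweepB 0 l).2 ≠ [] := fun he => hno ((noI_iff 0 l).mpr he)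
      have hne : ((sweepB 0 l).2.isEmpty) = false := by simpa [List.isEmpty_iff] using h2
      have hdec := invI_decrease 0 l hno'
      simp only [get_swapsGo, loopB, hno, Bool.false_eq_true, if_false, hne, sweepA_top]
      exact ih (sweepB 0 l).1 (s ++ (sweepB 0 l).2) (by omega)

-- ===== VERDICT (by name: the statement is the Claim_ definition above) =====
theorem get_swaps_spec : Claim_equal_get_swaps := by
  intro l s _
  show get_swaps l s = get_swaps_alt l s
  exact main_eq (invI l + 1) l s (by omega)
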